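-- pv_equiv track=rewrite | github.com/oridwan/HT-GenDFT | results_plot/phonon_band_dos_plot.py | formula_to_latex
-- ===== SOURCE A (Python) =====
-- def formula_to_latex(formula: str) -> str:
--     """
--     Convert chemical formula to LaTeX format with subscripts.
--
--     Example: 'Cs6Al2S5' -> 'Cs$_{6}$Al$_{2}$S$_{5}$'
--     """
--     result = []
--     i = 0
--     while i < len(formula):
--         char = formula[i]
--         if char.isdigit():
--             # Check if we're already in a subscript
--             if result and result[-1].endswith('_{'):
--                 result.append(char)
--             else:
--                 result.append('$_{' + char)
--             # Look ahead for more digits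
--             i += 1
--             while i < len(formula) and formula[i].isdigit():
--                 result.append(formula[i])
--                 i += 1
--             result.append('}$')
--         else:
--             result.append(char)
--             i += 1
--     return ''.join(result)
-- ===== SOURCE B (Python) =====
-- def formula_to_latex(formula: str) -> str:
--     """Single scan that emits '$_{' / '}$' at digit-run boundaries (no look-ahead, no index)."""
--     out = []
--     prev_digit = False
--     for ch in formula:
--         d = ch.isdigit()
--         if d and not prev_digit:
--             out.append('$_{')
--         elif prev_digit and not d:
--             out.append('}$')
--         out.append(ch)
--         prev_digit = d
--     if prev_digit:
--         out.append('}$')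
--     return ''.join(out)
-- ===== Notes on version B (the rewrite author's own statement) =====
-- stated objective: simpler
-- what changed: Replaced A's index-based while-loop with an inner digit look-ahead loop and an endswith check on the last piece by a single for-loop over the characters that tracks a prev_digit flag and emits the subscript opener/closer exactly at digit-run boundaries.
import Mathlib
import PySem

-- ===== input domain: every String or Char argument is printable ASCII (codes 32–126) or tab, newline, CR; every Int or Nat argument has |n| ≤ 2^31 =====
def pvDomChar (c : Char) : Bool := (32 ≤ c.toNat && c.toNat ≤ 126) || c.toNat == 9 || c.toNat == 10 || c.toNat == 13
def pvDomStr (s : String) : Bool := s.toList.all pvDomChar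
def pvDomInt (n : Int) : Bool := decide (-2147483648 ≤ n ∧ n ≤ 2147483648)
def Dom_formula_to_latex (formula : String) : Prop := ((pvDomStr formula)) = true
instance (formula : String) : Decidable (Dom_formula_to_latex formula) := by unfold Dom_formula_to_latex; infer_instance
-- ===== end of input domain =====

-- B replaces A's index/look-ahead loop by a single boundary-emitting scan (objective: simpler).

-- ===== PORT A =====
-- A's inner "look ahead for more digits" while-loop: returns the digit pieces
-- (each appended as a one-char string, as in A) and the remaining characters.
def digitsRunA : List Char → List (List Char) × List Char
  | [] => ([], [])
  | c :: rest =>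
    if PySem.Chars.isdigit c then
      let p := digitsRunA rest
      ([c] :: p.1, p.2)
    else ([], c :: rest)

lemma digitsRunA_snd_length : ∀ cs : List Char, (digitsRunA cs).2.length ≤ cs.length := by
  intro cs
  induction cs with
  | nil => simp [digitsRunA]
  | cons c rest ih =>
    by_cases h : PySem.Chars.isdigit c
    · simp [digitsRunA, h]; omega
    · simp [digitsRunA, h]

-- A's outer while-loop over the index, carried as recursion over the remaining chars.
def loopA (cs : List Char) (result : List (List Char)) : List (List Char) :=
  match cs with
  | [] => result
  | c :: rest =>
    if PySem.Chars.isdigit c then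
      -- "if result and result[-1].endswith('_{'): append(char) else: append('$_{'+char)"
      let head :=
        match result.getLast? with
        | some s => if PySem.Chars.endswith s ['_', '{'] then [c] else ['$', '_', '{', c]
        | none => ['$', '_', '{', c]
      let p := digitsRunA rest
      loopA p.2 (result ++ [head] ++ p.1 ++ [['}', '$']])
    else
      loopA rest (result ++ [[c]])
termination_by cs.length
decreasing_by
  · have := digitsRunA_snd_length rest; simp at *; omega
  · simp

def formula_to_latex (formula : String) : String :=
  String.ofList (PySem.Chars.join [] (loopA formula.toList []))

-- ===== PORT B =====
-- B's for-loop: state = (prev_digit, out); emits '$_{' / '}$' at classification boundaries.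
def loopB : List Char → Bool → List (List Char) → List (List Char)
  | [], prev, out => if prev then out ++ [['}', '$']] else out
  | c :: rest, prev, out =>
    let d := PySem.Chars.isdigit c
    let out' :=
      if d && !prev then out ++ [['$', '_', '{']]
      else if prev && !d then out ++ [['}', '$']]
      else out
    loopB rest d (out' ++ [[c]])

def formula_to_latex_alt (formula : String) : String :=
  String.ofList (PySem.Chars.join [] (loopB formula.toList false []))

-- ===== PRECONDITION & SPEC =====
def Spec_formula_to_latex (formula : String) (out : String) : Prop := out = formula_to_latex_alt formula
instance (formula : String) (out : String) : Decidable (Spec_formula_to_latex formula out) := by unfold Spec_formula_to_latex; infer_instance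

-- ===== CLAIM (what is proved, stated in full; the proofs are below) =====
def Claim_equal_formula_to_latex : Prop := ∀ (formula : String), Dom_formula_to_latex formula → Spec_formula_to_latex formula (formula_to_latex formula)

-- ===== LEMMAS AND PROOFS =====

-- ''.join only depends on the concatenation of the pieces.
lemma joinNil_eq_flatten : ∀ ps : List (List Char), PySem.Chars.join [] ps = ps.flatten := by
  intro ps
  induction ps with
  | nil => simp [PySem.Chars.join, List.intercalate]
  | cons p ps ih =>
    cases ps <;> simp_all [PySem.Chars.join, List.intercalate, List.intersperse]

-- invariant on A's accumulator: its last piece never ends with '_{'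
def lastOk (R : List (List Char)) : Prop :=
  ∀ s ∈ R.getLast?, PySem.Chars.endswith s ['_', '{'] = false

lemma lastOk_singleton_char (R : List (List Char)) (c : Char) : lastOk (R ++ [[c]]) := by
  intro s hs
  simp at hs
  subst hs
  rw [← Bool.not_eq_true, PySem.Chars.endswith_iff]
  intro h
  have := h.length_le
  simp at this

lemma lastOk_close (R : List (List Char)) : lastOk (R ++ [['}', '$']]) := by
  intro s hs
  simp at hs
  subst hs
  decide

-- B over a digit run: append the digits one by one, then close the subscript.
lemma runB : ∀ (l : List Char) (O : List (List Char)),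
    loopB l true O = loopB (digitsRunA l).2 false (O ++ (digitsRunA l).1 ++ [['}', '$']]) := by
  intro l
  induction l with
  | nil => intro O; simp [digitsRunA, loopB]
  | cons c rest ih =>
    intro O
    by_cases h : PySem.Chars.isdigit c
    · simp only [loopB, digitsRunA, h]
      simp only [Bool.not_true, Bool.and_false, Bool.false_eq_true, if_false]
      rw [ih (O ++ [[c]])]
      simp
    · simp only [loopB, digitsRunA, h]
      simp [loopB, h]

lemma main_lemma : ∀ (n : Nat) (cs : List Char), cs.length ≤ n →
    ∀ (R O : List (List Char)), lastOk R → R.flatten = O.flatten →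
    (loopA cs R).flatten = (loopB cs false O).flatten := by
  intro n
  induction n with
  | zero =>
    intro cs hlen R O _ hRO
    have : cs = [] := by simpa using List.eq_nil_of_length_eq_zero (by omega)
    subst this
    simpa [loopA, loopB] using hRO
  | succ n ih =>
    intro cs hlen R O hOk hRO
    cases cs with
    | nil => simpa [loopA, loopB] using hRO
    | cons c rest =>
      by_cases h : PySem.Chars.isdigit c
      · -- digit run
        have hhead : (match R.getLast? with
            | some s => if PySem.Chars.endswith s ['_', '{'] then [c] else ['$', '_', '{', c]
            | none => ['$', '_', '{', c]) = ['$', '_', '{', c] := by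
          cases hR : R.getLast? with
          | none => rfl
          | some s => simp [hOk s (by simp [hR])]
        simp only [loopA, h, if_pos, hhead]
        simp only [loopB, h]
        simp only [Bool.not_false, Bool.and_true, if_true]
        rw [show (O ++ [['$', '_', '{']]) ++ [[c]] = O ++ [['$', '_', '{']] ++ [[c]] by simp,
           runB rest (O ++ [['$', '_', '{']] ++ [[c]])]
        apply ih
        · have := digitsRunA_snd_length rest; simp at hlen ⊢; omega
        · have : R ++ [['$', '_', '{', c]] ++ (digitsRunA rest).1 ++ [['}', '$']]
              = (R ++ [['$', '_', '{', c]] ++ (digitsRunA rest).1) ++ [['}', '$']] := by simp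
          rw [this]; exact lastOk_close _
        · simp [hRO]
      · -- non-digit char
        simp only [loopA, h, loopB]
        simp only [Bool.false_and, Bool.false_eq_true, if_false]
        apply ih
        · simp at hlen ⊢; omega
        · exact lastOk_singleton_char R c
        · simp [hRO]

-- ===== VERDICT (by name: the statement is the Claim_ definition above) =====
theorem formula_to_latex_spec : Claim_equal_formula_to_latex := by
  intro formula _
  unfold Spec_formula_to_latex formula_to_latex formula_to_latex_alt
  rw [joinNil_eq_flatten, joinNil_eq_flatten]
  congr 1
  exact main_lemma formula.toList.length formula.toList le_rfl [] [] (by intro s hs; simp at hs) rfl
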